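-- pv_equiv track=rewrite | github.com/eldemaster/mqttscratch | src/broker.py | get_variable_length_bytes
-- ===== SOURCE A (Python) =====
-- def get_variable_length_bytes(value):
--     # Calculate the number of bytes needed for a Variable Byte Integer
--     count = 0
--     while True:
--         count += 1
--         value = value // 128
--         if value == 0:
--             break
--     return count
-- ===== SOURCE B (Python) =====
-- def get_variable_length_bytes(value):
--     # closed form: number of base-128 digits of value
--     if value == 0:
--         return 1
--     return (value.bit_length() + 6) // 7
-- ===== Notes on version B (the rewrite author's own statement) =====
-- stated objective: simpler
-- what changed: Replaces the repeated //128 loop by a closed-form arithmetic expression over the bit length ((bit_length+6)//7, with 0 mapped to 1); Pre_ excludes negative inputs, on which A loops forever (value//128 stays -1).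
import Mathlib
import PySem

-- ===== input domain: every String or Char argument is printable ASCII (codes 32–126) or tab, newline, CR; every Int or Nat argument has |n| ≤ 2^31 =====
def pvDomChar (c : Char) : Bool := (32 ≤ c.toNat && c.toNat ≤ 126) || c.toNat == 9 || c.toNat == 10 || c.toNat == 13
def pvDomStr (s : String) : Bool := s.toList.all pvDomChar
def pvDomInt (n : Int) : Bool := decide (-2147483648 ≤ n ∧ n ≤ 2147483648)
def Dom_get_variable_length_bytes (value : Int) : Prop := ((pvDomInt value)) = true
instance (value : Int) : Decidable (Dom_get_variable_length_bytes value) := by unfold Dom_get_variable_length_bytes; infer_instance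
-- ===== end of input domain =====

-- B replaces A's repeated //128 loop by the closed form (bit_length+6)//7 (0 ↦ 1): simpler, no loop.
-- Equivalence is about the return value only; Pre_ excludes negatives, where A loops forever.

-- ===== PORT A =====
-- A's 'while True' loop; fuel value.toNat+1 only makes the recursion total (it suffices for
-- every value ≥ 0, i.e. everywhere A terminates); each step is exactly A's body.
def gvlLoop : Nat → Int → Int → Int
  | 0, _, count => count            -- fuel exhausted: Python diverges here (excluded by Pre_)
  | fuel + 1, value, count =>
      let count := count + 1
      let value := PySem.Int.floordiv value 128
      if value = 0 then count else gvlLoop fuel value count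

def get_variable_length_bytes (value : Int) : Int :=
  gvlLoop (value.toNat + 1) value 0

-- ===== PORT B =====
def get_variable_length_bytes_alt (value : Int) : Int :=
  if value = 0 then 1
  else PySem.Int.floordiv ((PySem.Int.bitLength value : Int) + 6) 7

-- ===== PRECONDITION & SPEC =====
-- Pre_ excludes negative inputs: there value//128 stays negative and A's loop never terminates.
def Pre_get_variable_length_bytes (value : Int) : Prop := 0 ≤ value
instance (value : Int) : Decidable (Pre_get_variable_length_bytes value) := by
  unfold Pre_get_variable_length_bytes; infer_instance

def pvWitness_get_variable_length_bytes : Int := 300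

def Spec_get_variable_length_bytes (value : Int) (out : Int) : Prop := out = get_variable_length_bytes_alt value
instance (value : Int) (out : Int) : Decidable (Spec_get_variable_length_bytes value out) := by unfold Spec_get_variable_length_bytes; infer_instance

-- ===== CLAIM (what is proved, stated in full; the proofs are below) =====
def Claim_equal_get_variable_length_bytes : Prop := ∀ (value : Int), Dom_get_variable_length_bytes value → Pre_get_variable_length_bytes value → Spec_get_variable_length_bytes value (get_variable_length_bytes value)

-- ===== LEMMAS AND PROOFS =====

-- bitLength drops by exactly 7 under division by 128 (for m ≥ 128)
lemma bl_div128 (m : Nat) (h : 128 ≤ m) :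
    PySem.Int.bitLength ((m / 128 : Nat) : Int) + 7 = PySem.Int.bitLength (m : Int) := by
  have e : m / 128 = m / 2 / 2 / 2 / 2 / 2 / 2 / 2 := by omega
  rw [e]
  rw [PySem.Int.bitLength_natCast (m := m) (by omega)]
  rw [PySem.Int.bitLength_natCast (m := m/2) (by omega)]
  rw [PySem.Int.bitLength_natCast (m := m/2/2) (by omega)]
  rw [PySem.Int.bitLength_natCast (m := m/2/2/2) (by omega)]
  rw [PySem.Int.bitLength_natCast (m := m/2/2/2/2) (by omega)]
  rw [PySem.Int.bitLength_natCast (m := m/2/2/2/2/2) (by omega)]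
  rw [PySem.Int.bitLength_natCast (m := m/2/2/2/2/2/2) (by omega)]

lemma loopA_eq (m : Nat) (hm : 0 < m) :
    ∀ fuel : Nat, m < fuel → ∀ c : Int,
      gvlLoop fuel (m : Int) c = c + ((PySem.Int.bitLength (m : Int) + 6) / 7 : Nat) := by
  induction m using Nat.strong_induction_on with
  | _ m ih =>
    intro fuel hf c
    match fuel, hf with
    | f + 1, hf =>
      have hdiv : PySem.Int.floordiv (m : Int) 128 = ((m / 128 : Nat) : Int) := by
        exact_mod_cast PySem.Int.floordiv_natCast m 128
      by_cases h128 : m < 128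
      · -- quotient is 0: loop returns c + 1; bitLength m ∈ [1,7]
        have hq : m / 128 = 0 := by omega
        have hL1 : 1 ≤ PySem.Int.bitLength (m : Int) := by
          rw [PySem.Int.bitLength_natCast (m := m) hm]; omega
        have hle : 2 ^ (PySem.Int.bitLength (m : Int) - 1) ≤ m := by
          have := PySem.Int.two_pow_bitLength_le (m : Int) (by exact_mod_cast hm.ne')
          simpa using this
        have hL7 : PySem.Int.bitLength (m : Int) ≤ 7 := by
          by_contra hgt
          have : 2 ^ 7 ≤ 2 ^ (PySem.Int.bitLength (m : Int) - 1) :=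
            Nat.pow_le_pow_right (by norm_num) (by omega)
          omega
        have hEq : (PySem.Int.bitLength (m : Int) + 6) / 7 = 1 := by omega
        simp only [gvlLoop, hdiv, hq, Nat.cast_zero, if_pos]
        rw [hEq]
        norm_num
      · -- quotient positive: one step, then the induction hypothesis
        have hq : 0 < m / 128 := by omega
        have hlt : m / 128 < m := Nat.div_lt_self hm (by norm_num)
        have := ih (m / 128) hlt hq f (by omega) (c + 1)
        simp only [gvlLoop, hdiv]
        rw [if_neg (by exact_mod_cast hq.ne')]
        rw [this]
        have hbl := bl_div128 m (by omega)
        have hbl1 : 1 ≤ PySem.Int.bitLength ((m / 128 : Nat) : Int) := by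
          rw [PySem.Int.bitLength_natCast (m := m/128) hq]; omega
        omega

-- ===== VERDICT (by name: the statement is the Claim_ definition above) =====
theorem get_variable_length_bytes_spec : Claim_equal_get_variable_length_bytes := by
  intro value _ hpre
  unfold Spec_get_variable_length_bytes
  obtain ⟨m, rfl⟩ : ∃ m : Nat, value = (m : Int) := ⟨value.toNat, (Int.toNat_of_nonneg hpre).symm⟩
  rcases Nat.eq_zero_or_pos m with hm | hm
  · subst hm; decide
  · unfold get_variable_length_bytes get_variable_length_bytes_alt
    rw [Int.toNat_natCast]
    rw [loopA_eq m hm (m + 1) (by omega) 0]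
    rw [if_neg (by exact_mod_cast hm.ne')]
    have h7 : PySem.Int.floordiv ((PySem.Int.bitLength (m : Int) : Int) + 6) 7
        = (((PySem.Int.bitLength (m : Int) + 6) / 7 : Nat) : Int) := by
      have := PySem.Int.floordiv_natCast (PySem.Int.bitLength (m : Int) + 6) 7
      push_cast at this ⊢
      exact_mod_cast this
    rw [h7]
    push_cast
    ring
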